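-- pv_equiv track=rewrite | github.com/JeevanandamBurra/Session5.0 | Session5.0.py | func
-- ===== SOURCE A (Python) =====
-- def func(lst):
--     x=list(lst)
--     n = None
--     y = []
--     for i in range(len(x)):
--         if x[i] != 0 and n== None:
--             y.append(i+1)
--         elif x[i] == 0:
--             y.append(0)
--             n = 0
--         else:
--             n += 1
--             y.append(n)
--     return y
-- ===== SOURCE B (Python) =====
-- from itertools import groupby
--
-- def func(lst):
--     y = []
--     for is_zero, grp in groupby(lst, key=lambda v: v == 0):
--         m = sum(1 for _ in grp)
--         if is_zero:
--             y.extend([0] * m)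
--         else:
--             y.extend(range(1, m + 1))
--     return y
-- ===== Notes on version B (the rewrite author's own statement) =====
-- stated objective: alternative
-- what changed: Replaces the per-element stateful counter (with the None-sentinel index branch) by an itertools.groupby run-decomposition: each maximal run of zeros emits 0s, each run of non-zeros emits 1..len(run).
import Mathlib
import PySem

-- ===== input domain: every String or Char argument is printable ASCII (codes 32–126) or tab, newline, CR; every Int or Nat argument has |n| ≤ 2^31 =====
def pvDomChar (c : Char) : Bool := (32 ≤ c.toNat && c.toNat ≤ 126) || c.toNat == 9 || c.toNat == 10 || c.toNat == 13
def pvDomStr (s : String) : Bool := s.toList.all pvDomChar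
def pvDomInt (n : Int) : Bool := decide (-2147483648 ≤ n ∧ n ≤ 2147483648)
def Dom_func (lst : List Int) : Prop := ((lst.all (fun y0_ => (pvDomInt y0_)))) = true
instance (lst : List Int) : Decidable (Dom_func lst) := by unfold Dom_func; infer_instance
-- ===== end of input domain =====

-- B replaces A's per-element stateful counter by a run (groupby) decomposition; alternative, same cost.


-- ===== PORT A =====
-- loop over i in range(len(x)) with state n : Option Int (None sentinel), ported as
-- structural recursion over the list carrying the index i
def funcLoop : List Int → Int → Option Int → List Int
  | [], _, _ => []
  | v :: rest, i, n =>
    if v ≠ 0 ∧ n = none then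
      (i + 1) :: funcLoop rest (i + 1) n
    else if v = 0 then
      0 :: funcLoop rest (i + 1) (some 0)
    else
      -- here n = some k (first branch failed with v ≠ 0), so n += 1 is getD 0 + 1
      let m := n.getD 0 + 1
      m :: funcLoop rest (i + 1) (some m)

def func (lst : List Int) : List Int := funcLoop lst 0 none

-- ===== PORT B =====
-- itertools.groupby(lst, key=v==0): each maximal run emits [0]*m or range(1, m+1)
def funcAltGo : List Int → List Int
  | [] => []
  | v :: rest =>
    let k := decide (v = 0)
    let m := (v :: rest.takeWhile (fun w => decide (w = 0) == k)).length
    let out := if k then List.replicate m 0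
               else (List.range m).map (fun j : Nat => (j : Int) + 1)
    out ++ funcAltGo (rest.dropWhile (fun w => decide (w = 0) == k))
termination_by xs => xs.length
decreasing_by
  simpa using Nat.lt_succ_of_le (List.length_dropWhile_le _ _)

def func_alt (lst : List Int) : List Int := funcAltGo lst

-- ===== PRECONDITION & SPEC =====
def Spec_func (lst : List Int) (out : List Int) : Prop := out = func_alt lst
instance (lst : List Int) (out : List Int) : Decidable (Spec_func lst out) := by unfold Spec_func; infer_instance

-- ===== CLAIM (what is proved, stated in full; the proofs are below) =====
def Claim_equal_func : Prop := ∀ (lst : List Int), Dom_func lst → Spec_func lst (func lst)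

-- ===== LEMMAS AND PROOFS =====

-- counter-only mirror of A's loop: zero resets the counter, nonzero increments and emits it
def pvG : List Int → Int → List Int
  | [], _ => []
  | v :: r, c => if v = 0 then 0 :: pvG r 0 else (c + 1) :: pvG r (c + 1)

-- final counter after pvG
def pvS : List Int → Int → Int
  | [], c => c
  | v :: r, c => if v = 0 then pvS r 0 else pvS r (c + 1)

theorem funcLoop_eq_pvG (xs : List Int) : ∀ i : Int,
    funcLoop xs i none = pvG xs i ∧ ∀ k : Int, funcLoop xs i (some k) = pvG xs k := by
  induction xs with
  | nil => intro i; simp [funcLoop, pvG]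
  | cons v r ih =>
    intro i
    by_cases hv : v = 0
    · subst hv
      constructor
      · simp [funcLoop, pvG, (ih (i + 1)).2 0]
      · intro k; simp [funcLoop, pvG, (ih (i + 1)).2 0]
    · constructor
      · simp [funcLoop, pvG, hv, (ih (i + 1)).1]
      · intro k; simp [funcLoop, pvG, hv, (ih (i + 1)).2 (k + 1)]

theorem pvG_append (xs ys : List Int) : ∀ c : Int,
    pvG (xs ++ ys) c = pvG xs c ++ pvG ys (pvS xs c) := by
  induction xs with
  | nil => intro c; simp [pvG, pvS]
  | cons v r ih =>
    intro c
    by_cases hv : v = 0 <;> simp [pvG, pvS, hv, ih]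

theorem pvG_zeros (xs : List Int) (h : ∀ x ∈ xs, x = 0) (c : Int) :
    pvG xs c = List.replicate xs.length 0 := by
  induction xs generalizing c with
  | nil => simp [pvG]
  | cons v r ih =>
    have hv : v = 0 := h v (by simp)
    simp [pvG, hv, List.replicate_succ, ih (fun x hx => h x (by simp [hx]))]

theorem pvS_zeros (xs : List Int) (h : ∀ x ∈ xs, x = 0) (c : Int) (hne : xs ≠ []) :
    pvS xs c = 0 := by
  induction xs generalizing c with
  | nil => exact absurd rfl hne
  | cons v r ih =>
    have hv : v = 0 := h v (by simp)
    rcases r with _ | ⟨w, t⟩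
    · simp [pvS, hv]
    · simp only [pvS, hv]
      exact ih (fun x hx => h x (by simp [hx])) 0 (by simp)

theorem pvG_nonzeros (xs : List Int) (h : ∀ x ∈ xs, x ≠ 0) : ∀ c : Int,
    pvG xs c = (List.range xs.length).map (fun j : Nat => c + (j : Int) + 1) := by
  induction xs with
  | nil => intro c; simp [pvG]
  | cons v r ih =>
    intro c
    have hv : v ≠ 0 := h v (by simp)
    rw [List.length_cons, List.range_succ_eq_map, List.map_cons, List.map_map]
    rw [show pvG (v :: r) c = (c + 1) :: pvG r (c + 1) by simp [pvG, hv]]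
    rw [List.cons_eq_cons]
    refine ⟨by push_cast; ring, ?_⟩
    rw [ih (fun x hx => h x (by simp [hx])) (c + 1)]
    apply List.map_congr_left
    intro j _
    simp [Function.comp]
    ring

theorem pvG_head_zero (xs : List Int) (c : Int)
    (h : xs = [] ∨ ∃ t, xs = 0 :: t) : pvG xs c = pvG xs 0 := by
  rcases h with h | ⟨t, h⟩ <;> subst h <;> simp [pvG]

theorem mem_takeWhile_arg {p : Int → Bool} {xs : List Int} {x : Int}
    (h : x ∈ xs.takeWhile p) : p x = true :=
  List.mem_takeWhile_imp h

theorem head_dropWhile {p : Int → Bool} (xs : List Int)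
    (h : xs.dropWhile p ≠ []) : p ((xs.dropWhile p).headI) = false := by
  induction xs with
  | nil => simp [List.dropWhile] at h
  | cons v r ih =>
    by_cases hp : p v = true
    · rw [List.dropWhile_cons_of_pos hp] at h ⊢; exact ih h
    · rw [List.dropWhile_cons_of_neg hp]
      simpa using hp

theorem funcAltGo_eq_pvG_aux (n : Nat) : ∀ xs : List Int, xs.length ≤ n → funcAltGo xs = pvG xs 0 := by
  induction n with
  | zero =>
    intro xs hlen
    have : xs = [] := List.eq_nil_of_length_eq_zero (Nat.le_zero.mp hlen)
    subst this; simp [funcAltGo, pvG]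
  | succ n ih' =>
    intro xs hlen
    have ih : ∀ ys : List Int, ys.length < xs.length → funcAltGo ys = pvG ys 0 := by
      intro ys hys; exact ih' ys (by omega)
    match xs with
    | [] => simp [funcAltGo, pvG]
    | v :: r =>
      rw [funcAltGo]
      set p : Int → Bool := fun w => decide (w = 0) == decide (v = 0) with hp
      have hsplit : (v :: r.takeWhile p) ++ r.dropWhile p = v :: r := by
        simp [List.takeWhile_append_dropWhile]
      have hdlen : (r.dropWhile p).length < (v :: r).length :=
        Nat.lt_succ_of_le (List.length_dropWhile_le _ _)
      have ihd := ih (r.dropWhile p) hdlen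
      by_cases hv : v = 0
      · -- zero run
        have hall : ∀ x ∈ v :: r.takeWhile p, x = 0 := by
          intro x hx
          rcases List.mem_cons.mp hx with rfl | hx
          · exact hv
          · have := mem_takeWhile_arg hx
            simpa [hp, hv] using this
        have hd0 : pvG (r.dropWhile p) (pvS (v :: r.takeWhile p) 0) = pvG (r.dropWhile p) 0 := by
          rw [pvS_zeros _ hall 0 (by simp)]
        calc (if decide (v = 0) then List.replicate (v :: r.takeWhile p).length 0
                else (List.range (v :: r.takeWhile p).length).map (fun j : Nat => (j : Int) + 1))
              ++ funcAltGo (r.dropWhile p)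
            = List.replicate (v :: r.takeWhile p).length 0 ++ pvG (r.dropWhile p) 0 := by
              rw [ihd]; simp [hv]
          _ = pvG (v :: r.takeWhile p) 0 ++ pvG (r.dropWhile p) (pvS (v :: r.takeWhile p) 0) := by
              rw [pvG_zeros _ hall, hd0]
          _ = pvG ((v :: r.takeWhile p) ++ r.dropWhile p) 0 := (pvG_append _ _ 0).symm
          _ = pvG (v :: r) 0 := by rw [hsplit]
      · -- nonzero run
        have hall : ∀ x ∈ v :: r.takeWhile p, x ≠ 0 := by
          intro x hx
          rcases List.mem_cons.mp hx with rfl | hx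
          · exact hv
          · have := mem_takeWhile_arg hx
            simpa [hp, hv] using this
        have hd0 : pvG (r.dropWhile p) (pvS (v :: r.takeWhile p) 0) = pvG (r.dropWhile p) 0 := by
          apply pvG_head_zero
          rcases hd : r.dropWhile p with _ | ⟨w, t⟩
          · exact Or.inl rfl
          · right
            have := head_dropWhile (p := p) r (by simp [hd])
            rw [hd] at this
            simp [hp, hv] at this
            exact ⟨t, by rw [this]⟩
        calc (if decide (v = 0) then List.replicate (v :: r.takeWhile p).length 0
                else (List.range (v :: r.takeWhile p).length).map (fun j : Nat => (j : Int) + 1))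
              ++ funcAltGo (r.dropWhile p)
            = (List.range (v :: r.takeWhile p).length).map (fun j : Nat => (j : Int) + 1)
              ++ pvG (r.dropWhile p) 0 := by rw [ihd]; simp [hv]
          _ = pvG (v :: r.takeWhile p) 0 ++ pvG (r.dropWhile p) (pvS (v :: r.takeWhile p) 0) := by
              rw [pvG_nonzeros _ hall 0, hd0]
              congr 1
              apply List.map_congr_left
              intro j _; ring
          _ = pvG ((v :: r.takeWhile p) ++ r.dropWhile p) 0 := (pvG_append _ _ 0).symm
          _ = pvG (v :: r) 0 := by rw [hsplit]

-- ===== VERDICT (by name: the statement is the Claim_ definition above) =====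
theorem func_spec : Claim_equal_func := by
  intro lst _
  unfold Spec_func func func_alt
  rw [(funcLoop_eq_pvG lst 0).1, funcAltGo_eq_pvG_aux lst.length lst le_rfl]
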